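-- pv_equiv track=rewrite | github.com/Kenbaz/Konvrt-backend | apps/api/utils.py | sanitize_filename_for_header
-- ===== SOURCE A (Python) =====
-- def sanitize_filename_for_header(filename: str) -> str:
--     """
--     Sanitize a filename for use in HTTP headers.
--
--     Removes or replaces characters that could cause issues in
--     Content-Disposition headers.
--
--     Args:
--         filename: The original filename
--
--     Returns:
--         Sanitized filename
--     """
--     if not filename:
--         return "download"
--
--     sanitized = filename
--
--     # Replace backslashes and forward slashes
--     sanitized = sanitized.replace('\\', '_').replace('/', '_')
--
--     # Replace quotes
--     sanitized = sanitized.replace('"', "'").replace('\n', '').replace('\r', '')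
--
--     # Remove control characters
--     sanitized = ''.join(char for char in sanitized if ord(char) >= 32)
--
--     if not sanitized or sanitized.strip() == '':
--         return "download"
--
--     return sanitized.strip()
-- ===== SOURCE B (Python) =====
-- _TABLE = {ord('\\'): '_', ord('/'): '_', ord('"'): "'"}
-- for _c in range(32):
--     _TABLE[_c] = None
--
-- def sanitize_filename_for_header(filename: str) -> str:
--     if not filename:
--         return "download"
--     stripped = filename.translate(_TABLE).strip()
--     return stripped if stripped else "download"
-- ===== Notes on version B (the rewrite author's own statement) =====
-- stated objective: idiomatic
-- what changed: Replaces the chain of four .replace() scans plus a separate filter comprehension by one translation table applied in a single str.translate pass, with one strip-based emptiness check.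
import Mathlib
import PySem

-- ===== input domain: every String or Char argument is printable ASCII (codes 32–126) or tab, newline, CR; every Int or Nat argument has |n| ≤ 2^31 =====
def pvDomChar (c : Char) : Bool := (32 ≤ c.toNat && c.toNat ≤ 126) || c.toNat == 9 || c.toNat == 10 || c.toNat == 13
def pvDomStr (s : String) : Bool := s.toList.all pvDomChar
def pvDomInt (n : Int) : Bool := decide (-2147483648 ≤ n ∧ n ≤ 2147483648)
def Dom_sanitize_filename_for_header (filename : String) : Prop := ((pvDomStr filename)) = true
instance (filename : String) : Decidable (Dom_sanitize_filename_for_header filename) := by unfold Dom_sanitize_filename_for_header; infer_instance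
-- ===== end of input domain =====

-- B replaces A's chain of four .replace() scans + a filter comprehension by one
-- translation table applied in a single pass (objective: idiomatic single pass).

-- ===== PORT A =====
def sanitize_filename_for_header (filename : String) : String :=
  if filename = "" then "download"
  else
    let s1 := PySem.Str.replace (PySem.Str.replace filename "\\" "_") "/" "_"
    let s2 := PySem.Str.replace (PySem.Str.replace (PySem.Str.replace s1 "\"" "'") "\n" "") "\r" ""
    let s3 := String.ofList (s2.toList.filter (fun c => 32 ≤ c.toNat))
    if s3 = "" ∨ PySem.Str.strip s3 = "" then "download"
    else PySem.Str.strip s3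

-- ===== PORT B =====
-- B's translation table: control chars (incl. \n, \r) drop, slashes → '_', '"' → '\''
def pvTable (c : Char) : List Char :=
  if c.toNat < 32 then []
  else if c = '\\' ∨ c = '/' then ['_']
  else if c = '"' then ['\'']
  else [c]

def sanitize_filename_for_header_alt (filename : String) : String :=
  if filename = "" then "download"
  else
    let stripped := PySem.Str.strip (String.ofList (filename.toList.flatMap pvTable))
    if stripped = "" then "download" else stripped

-- ===== PRECONDITION & SPEC =====
def Spec_sanitize_filename_for_header (filename : String) (out : String) : Prop := out = sanitize_filename_for_header_alt filename
instance (filename : String) (out : String) : Decidable (Spec_sanitize_filename_for_header filename out) := by unfold Spec_sanitize_filename_for_header; infer_instance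

-- ===== CLAIM (what is proved, stated in full; the proofs are below) =====
def Claim_equal_sanitize_filename_for_header : Prop := ∀ (filename : String), Dom_sanitize_filename_for_header filename → Spec_sanitize_filename_for_header filename (sanitize_filename_for_header filename)

-- ===== LEMMAS AND PROOFS =====

-- single-character replace is a flatMap over the characters
lemma go_single (a : Char) (new : List Char) :
    ∀ (l acc : List Char) (fuel : Nat), l.length ≤ fuel →
    PySem.Chars.replace.go [a] new fuel l acc
      = acc.reverse ++ l.flatMap (fun c => if c = a then new else [c]) := by
  intro l
  induction l with
  | nil => intro acc fuel _; cases fuel <;> simp [PySem.Chars.replace.go]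
  | cons c t ih =>
      intro acc fuel hf
      cases fuel with
      | zero => simp at hf
      | succ fuel =>
        simp only [PySem.Chars.replace.go]
        by_cases h : c = a
        · subst h
          simp [List.isPrefixOf, ih (new.reverse ++ acc) fuel (by simpa using hf)]
        · simp [List.isPrefixOf, h, ih (c :: acc) fuel (by simpa using hf), Ne.symm h]

lemma replace_single (s : List Char) (a : Char) (new : List Char) :
    PySem.Chars.replace s [a] new = s.flatMap (fun c => if c = a then new else [c]) := by
  simpa using go_single a new s [] s.length le_rfl

-- the per-character effect of A's whole replace/filter pipeline equals B's table
lemma head_eq (c : Char) :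
    ((((((if c = '\\' then ['_'] else [c]).flatMap
        (fun d => if d = '/' then ['_'] else [d])).flatMap
        (fun d => if d = '"' then ['\''] else [d])).flatMap
        (fun d => if d = '\n' then [] else [d])).flatMap
        (fun d => if d = '\r' then [] else [d])).filter (fun d => 32 ≤ d.toNat))
      = pvTable c := by
  unfold pvTable
  by_cases h1 : c = '\\'
  · subst h1; decide
  · by_cases h2 : c = '/'
    · subst h2; decide
    · by_cases h3 : c = '"'
      · subst h3; decide
      · by_cases h4 : c = '\n'
        · subst h4; decide
        · by_cases h5 : c = '\r'
          · subst h5; decide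
          · simp [h1, h2, h3, h4, h5]
            by_cases h6 : c.toNat < 32
            · simp [h6, Nat.not_le.mpr h6]
            · simp [h6, Nat.le_of_not_lt h6]

lemma chain_eq (l : List Char) :
    ((((((l.flatMap (fun c => if c = '\\' then ['_'] else [c])).flatMap
        (fun d => if d = '/' then ['_'] else [d])).flatMap
        (fun d => if d = '"' then ['\''] else [d])).flatMap
        (fun d => if d = '\n' then [] else [d])).flatMap
        (fun d => if d = '\r' then [] else [d])).filter (fun d => 32 ≤ d.toNat))
      = l.flatMap pvTable := by
  induction l with
  | nil => rfl
  | cons c t ih =>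
      simp only [List.flatMap_cons, List.flatMap_append, List.filter_append, ih]
      rw [head_eq]

-- ===== VERDICT (by name: the statement is the Claim_ definition above) =====
theorem sanitize_filename_for_header_spec : Claim_equal_sanitize_filename_for_header := by
  intro filename _
  unfold Spec_sanitize_filename_for_header sanitize_filename_for_header sanitize_filename_for_header_alt
  by_cases h0 : filename = ""
  · simp [h0]
  · simp only [h0]
    have hcore :
        ((PySem.Str.replace (PySem.Str.replace (PySem.Str.replace
            (PySem.Str.replace (PySem.Str.replace filename "\\" "_") "/" "_")
            "\"" "'") "\n" "") "\r" "").toList.filter (fun c => 32 ≤ c.toNat))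
          = filename.toList.flatMap pvTable := by
      simp only [PySem.Str.toList_replace]
      have e1 : ("\\" : String).toList = ['\\'] := by decide
      have e2 : ("_" : String).toList = ['_'] := by decide
      have e3 : ("/" : String).toList = ['/'] := by decide
      have e4 : ("\"" : String).toList = ['"'] := by decide
      have e5 : ("'" : String).toList = ['\''] := by decide
      have e6 : ("\n" : String).toList = ['\n'] := by decide
      have e7 : ("\r" : String).toList = ['\r'] := by decide
      have e8 : ("" : String).toList = [] := by decide
      rw [e1, e2, e3, e4, e5, e6, e7, e8]
      rw [replace_single, replace_single, replace_single, replace_single, replace_single]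
      exact chain_eq filename.toList
    set L := filename.toList.flatMap pvTable with hL
    rw [hcore]
    by_cases hs : PySem.Str.strip (String.ofList L) = ""
    · simp [hs]
    · simp [hs]
      intro hL0
      exact absurd (by rw [hL0]; decide) hs
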